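-- pv_equiv track=rewrite | github.com/rafaroch/OCR_Python | ocr_dataset.py | DiferenciaMitadArea
-- ===== SOURCE A (Python) =====
-- def DiferenciaMitadArea(imagenmatriz,numfilas,numcolumnas):
--     #Lleva el conteo de ceros en la mitad de la imagen
--     contadorcerosmitad = 0
--     #Lleva el conteo de unos en la mitad de la imagen
--     contadorunosmitad = 0
--     #Se calcula el numero medio de columnas de la imagen
--     mitadcolumnas = int(numcolumnas/2)
--     #Lleva el conteo de ceros
--     contadorceros = 0
--     #lleva el conteo de unos
--     contadorunos = 0
--     #for recorre las filas de la matriz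
--     for x in range(numfilas):
--         #for recorre las columnas de la matriz
--         for y in range(numcolumnas):
--             #Busqueda de 0 en la imagen
--             if(imagenmatriz[x][y]==0):
--                 #Si se encuentra algun cero se aumenta uno el valor de contadorceros
--                 contadorceros = contadorceros + 1
--             else:
--                 #Si se encuentra algun cero se aumenta uno el valor de contadorunos
--                 contadorunos = contadorunos + 1
--     #for recorre las filas de la matriz
--     for x in range(numfilas):
--         #for recorre la mitad de columnas de la matriz
--         for y in range(mitadcolumnas):
--             #Busqueda de 0 en la imagen
--             if(imagenmatriz[x][y]==0):
--                 #Si se encuentra algun cero se aumenta uno el valor de contadorcerosmitad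
--                 contadorcerosmitad = contadorcerosmitad + 1
--             else:
--                  #Si se encuentra algun cero se aumenta uno el valor de contadorcerosmitad
--                 contadorunosmitad = contadorunosmitad + 1
--     #Se realiza la diferencia de unos respecto a los unos de la mitad
--     diferenciaunos = contadorunos - (contadorunosmitad*2)
--     #regresa el resultado de la operación previmamente hecha
--     return diferenciaunos
-- ===== SOURCE B (Python) =====
-- def DiferenciaMitadArea(imagenmatriz, numfilas, numcolumnas):
--     # Single pass: each nonzero cell contributes +1 on the right half, -1 on the left half.
--     mitadcolumnas = numcolumnas // 2
--     diferencia = 0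
--     for x in range(numfilas):
--         for y in range(numcolumnas):
--             if imagenmatriz[x][y] != 0:
--                 diferencia += 1 if y >= mitadcolumnas else -1
--     return diferencia
-- ===== Notes on version B (the rewrite author's own statement) =====
-- stated objective: simpler
-- what changed: Replaces A's two full double-loop counting passes (total ones and left-half ones, combined as total - 2*left) by one single double loop that accumulates a signed +1/-1 contribution per nonzero cell.
import Mathlib
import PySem

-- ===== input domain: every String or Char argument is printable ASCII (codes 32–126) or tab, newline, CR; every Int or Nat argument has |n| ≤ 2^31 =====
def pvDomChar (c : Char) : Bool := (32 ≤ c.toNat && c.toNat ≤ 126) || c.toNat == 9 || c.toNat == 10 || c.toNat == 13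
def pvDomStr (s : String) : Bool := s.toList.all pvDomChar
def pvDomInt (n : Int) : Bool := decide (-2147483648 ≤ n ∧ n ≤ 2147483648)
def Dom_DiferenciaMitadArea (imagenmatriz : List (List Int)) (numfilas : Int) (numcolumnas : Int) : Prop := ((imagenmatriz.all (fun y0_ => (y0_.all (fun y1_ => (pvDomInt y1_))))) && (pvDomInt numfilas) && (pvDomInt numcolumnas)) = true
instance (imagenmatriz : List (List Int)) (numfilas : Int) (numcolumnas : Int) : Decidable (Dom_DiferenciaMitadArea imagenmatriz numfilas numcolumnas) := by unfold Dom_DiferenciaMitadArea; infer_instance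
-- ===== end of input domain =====

-- B folds A's two counting passes (total ones, then left-half ones, combined as total - 2*left) into one signed single pass (+1 right half, -1 left half per nonzero cell); objective: simpler.


-- ===== PORT A =====
def DiferenciaMitadArea (imagenmatriz : List (List Int)) (numfilas : Int) (numcolumnas : Int) : Int :=
  let mitadcolumnas := PySem.Int.truncdiv numcolumnas 2  -- int(numcolumnas/2): exact here, |numcolumnas| ≤ 2^31 < 2^53
  let c1 := (PySem.List.pyRange 0 numfilas 1).foldl (fun p x =>
      (PySem.List.pyRange 0 numcolumnas 1).foldl (fun (p : Int × Int) y =>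
        if PySem.List.pyGetD (PySem.List.pyGetD imagenmatriz x []) y 0 = 0 then (p.1 + 1, p.2)
        else (p.1, p.2 + 1)) p) ((0 : Int), (0 : Int))
  let c2 := (PySem.List.pyRange 0 numfilas 1).foldl (fun p x =>
      (PySem.List.pyRange 0 mitadcolumnas 1).foldl (fun (p : Int × Int) y =>
        if PySem.List.pyGetD (PySem.List.pyGetD imagenmatriz x []) y 0 = 0 then (p.1 + 1, p.2)
        else (p.1, p.2 + 1)) p) ((0 : Int), (0 : Int))
  c1.2 - c2.2 * 2

-- ===== PORT B =====
def DiferenciaMitadArea_alt (imagenmatriz : List (List Int)) (numfilas : Int) (numcolumnas : Int) : Int :=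
  let mitadcolumnas := PySem.Int.floordiv numcolumnas 2
  (PySem.List.pyRange 0 numfilas 1).foldl (fun acc x =>
    (PySem.List.pyRange 0 numcolumnas 1).foldl (fun (acc : Int) y =>
      if PySem.List.pyGetD (PySem.List.pyGetD imagenmatriz x []) y 0 ≠ 0 then
        (if mitadcolumnas ≤ y then acc + 1 else acc - 1)
      else acc) acc) 0

-- ===== PRECONDITION & SPEC =====
-- Pre_ excludes exactly the inputs on which the Python A raises IndexError: when both loop
-- bounds are positive, A reads imagenmatriz[x][y] for every x < numfilas, y < numcolumnas.
def Pre_DiferenciaMitadArea (imagenmatriz : List (List Int)) (numfilas : Int) (numcolumnas : Int) : Prop :=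
  (0 < numfilas ∧ 0 < numcolumnas) →
    (numfilas ≤ (imagenmatriz.length : Int) ∧
     ∀ row ∈ imagenmatriz.take numfilas.toNat, numcolumnas ≤ (row.length : Int))
instance (imagenmatriz : List (List Int)) (numfilas : Int) (numcolumnas : Int) : Decidable (Pre_DiferenciaMitadArea imagenmatriz numfilas numcolumnas) := by unfold Pre_DiferenciaMitadArea; infer_instance

def pvWitness_DiferenciaMitadArea : List (List Int) × Int × Int := ([[1, 0, 1], [0, 1, 1]], 2, 3)

def Spec_DiferenciaMitadArea (imagenmatriz : List (List Int)) (numfilas : Int) (numcolumnas : Int) (out : Int) : Prop := out = DiferenciaMitadArea_alt imagenmatriz numfilas numcolumnas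
instance (imagenmatriz : List (List Int)) (numfilas : Int) (numcolumnas : Int) (out : Int) : Decidable (Spec_DiferenciaMitadArea imagenmatriz numfilas numcolumnas out) := by unfold Spec_DiferenciaMitadArea; infer_instance

-- ===== CLAIM (what is proved, stated in full; the proofs are below) =====
def Claim_equal_DiferenciaMitadArea : Prop := ∀ (imagenmatriz : List (List Int)) (numfilas : Int) (numcolumnas : Int), Dom_DiferenciaMitadArea imagenmatriz numfilas numcolumnas → Pre_DiferenciaMitadArea imagenmatriz numfilas numcolumnas → Spec_DiferenciaMitadArea imagenmatriz numfilas numcolumnas (DiferenciaMitadArea imagenmatriz numfilas numcolumnas)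

-- ===== LEMMAS AND PROOFS =====

-- A's pair-counting inner loop, as two sums.
theorem pairfold (g : Int → Int) (L : List Int) (p : Int × Int) :
    L.foldl (fun (p : Int × Int) y => if g y = 0 then (p.1 + 1, p.2) else (p.1, p.2 + 1)) p
      = (p.1 + (L.map fun y => if g y = 0 then (1 : Int) else 0).sum,
         p.2 + (L.map fun y => if g y = 0 then (0 : Int) else 1).sum) := by
  induction L generalizing p with
  | nil => simp
  | cons b L ih =>
    simp only [List.foldl_cons, List.map_cons, List.sum_cons]
    split_ifs <;> rw [ih] <;> simp only [Prod.mk.injEq] <;> constructor <;> ring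

-- B's signed inner loop, as a sum.
theorem signedfold (g : Int → Int) (mid : Int) (L : List Int) (a : Int) :
    L.foldl (fun (acc : Int) y =>
        if g y ≠ 0 then (if mid ≤ y then acc + 1 else acc - 1) else acc) a
      = a + (L.map fun y => if g y ≠ 0 then (if mid ≤ y then (1 : Int) else -1) else 0).sum := by
  induction L generalizing a with
  | nil => simp
  | cons b L ih =>
    simp only [List.foldl_cons, List.map_cons, List.sum_cons]
    split_ifs <;> rw [ih] <;> ring

-- Outer loop of A: an additive pair step sums componentwise.
theorem foldl_pair_sum (F G : Int → Int) (L : List Int) (p : Int × Int) :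
    L.foldl (fun (p : Int × Int) x => (p.1 + F x, p.2 + G x)) p
      = (p.1 + (L.map F).sum, p.2 + (L.map G).sum) := by
  induction L generalizing p with
  | nil => simp
  | cons a L ih => simp [ih]; constructor <;> ring

theorem sum_map_neg_int (F : Int → Int) (L : List Int) :
    (L.map fun y => -(F y)).sum = -((L.map F).sum) := by
  induction L with
  | nil => simp
  | cons a L ih => simp [ih]; ring

theorem sum_congr_sub (L : List Int) (Df F G : Int → Int)
    (h : ∀ x ∈ L, Df x = F x - 2 * G x) :
    (L.map Df).sum = (L.map F).sum - (L.map G).sum * 2 := by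
  induction L with
  | nil => simp
  | cons a L ih =>
    simp only [List.map_cons, List.sum_cons, h a (by simp),
      ih (fun x hx => h x (by simp [hx]))]
    ring

-- Per row: B's signed sum over the full width equals A's ones count minus twice the left-half ones count.
theorem row_eq (g : Int → Int) (nc : Int) :
    ((PySem.List.pyRange 0 nc 1).map fun y =>
        if g y ≠ 0 then (if PySem.Int.floordiv nc 2 ≤ y then (1 : Int) else -1) else 0).sum
      = ((PySem.List.pyRange 0 nc 1).map fun y => if g y = 0 then (0 : Int) else 1).sum
        - 2 * ((PySem.List.pyRange 0 (PySem.Int.truncdiv nc 2) 1).map fun y =>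
            if g y = 0 then (0 : Int) else 1).sum := by
  by_cases hnc : nc ≤ 0
  · have h1 : PySem.List.pyRange 0 nc 1 = [] := PySem.List.pyRange_one_eq_nil hnc
    have h2 : PySem.Int.truncdiv nc 2 ≤ 0 := by
      have h4 : (-nc).tdiv 2 = -(nc.tdiv 2) := Int.neg_tdiv nc 2
      have h5 := Int.tdiv_eq_ediv_of_nonneg (a := -nc) (b := 2) (by omega)
      have h6 := Int.ediv_nonneg (a := -nc) (b := 2) (by omega) (by omega)
      simp only [PySem.Int.truncdiv]
      omega
    have h3 : PySem.List.pyRange 0 (PySem.Int.truncdiv nc 2) 1 = [] :=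
      PySem.List.pyRange_one_eq_nil h2
    simp [h1, h3]
  · have hmidA : PySem.Int.truncdiv nc 2 = nc / 2 := by
      simp [PySem.Int.truncdiv, Int.tdiv_eq_ediv_of_nonneg (by omega : (0:Int) ≤ nc)]
    have hmidB : PySem.Int.floordiv nc 2 = nc / 2 :=
      PySem.Int.floordiv_eq_ediv_of_pos (by omega)
    have h0 : (0 : Int) ≤ nc / 2 := Int.ediv_nonneg (by omega) (by omega)
    have hle : nc / 2 ≤ nc := Int.ediv_le_self 2 (by omega)
    rw [hmidA, hmidB, PySem.List.pyRange_one_append 0 (nc / 2) nc h0 hle,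
        List.map_append, List.sum_append, List.map_append, List.sum_append]
    have hleft : ((PySem.List.pyRange 0 (nc / 2)).map fun y =>
        if g y ≠ 0 then (if nc / 2 ≤ y then (1 : Int) else -1) else 0)
        = (PySem.List.pyRange 0 (nc / 2)).map fun y => -(if g y = 0 then (0 : Int) else 1) := by
      refine List.map_congr_left (fun y hy => ?_)
      have := PySem.List.mem_pyRange_one.mp hy
      by_cases h : g y = 0 <;> simp [h, show ¬ (nc / 2 ≤ y) by omega]
    have hright : ((PySem.List.pyRange (nc / 2) nc).map fun y =>
        if g y ≠ 0 then (if nc / 2 ≤ y then (1 : Int) else -1) else 0)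
        = (PySem.List.pyRange (nc / 2) nc).map fun y => (if g y = 0 then (0 : Int) else 1) := by
      refine List.map_congr_left (fun y hy => ?_)
      have := PySem.List.mem_pyRange_one.mp hy
      by_cases h : g y = 0 <;> simp [h, show nc / 2 ≤ y by omega]
    rw [hleft, hright, sum_map_neg_int]
    ring

-- ===== VERDICT (by name: the statement is the Claim_ definition above) =====
theorem DiferenciaMitadArea_spec : Claim_equal_DiferenciaMitadArea := by
  intro m nf nc _ _
  show DiferenciaMitadArea m nf nc = DiferenciaMitadArea_alt m nf nc
  simp only [DiferenciaMitadArea, DiferenciaMitadArea_alt]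
  simp only [pairfold, signedfold, foldl_pair_sum, PySem.List.foldl_add, zero_add]
  exact (sum_congr_sub _ _ _ _
    (fun x _ => row_eq (fun y => PySem.List.pyGetD (PySem.List.pyGetD m x []) y 0) nc)).symm
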